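-- pv_equiv track=rewrite | github.com/Romain-Gerard/algo | packcombi.py | get_signable_inds
-- ===== SOURCE A (Python) =====
-- def get_signable_inds(part):
--     """
--     Récupère la liste des indices des éléments qui ne sont pas les premiers de leur bloc et pas dans le bloc zéro.
--     """
--     liste_signable_inds = []
--     ind = 0
--     for i in range(len(part)):
--         for j in range(0, len(part[i])):
--             if part[i][0] != 0 and part[i][j] != part[i][0]:
--                 liste_signable_inds.append(ind)
--             ind += 1
--     return liste_signable_inds
-- ===== SOURCE B (Python) =====
-- def get_signable_inds(part):
--     def go(rows, offset):
--         if not rows: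
--             return []
--         row = rows[0]
--         rest = go(rows[1:], offset + len(row))
--         if row and row[0] != 0:
--             first = row[0]
--             return [i for i, v in enumerate(row, offset) if v != first] + rest
--         return rest
--     return go(part, 0)
-- ===== Notes on version B (the rewrite author's own statement) =====
-- stated objective: alternative
-- what changed: Replaces A's iterative nested index loops with a manually maintained flat counter by a recursion over the block list that computes each block's start offset arithmetically, skips empty and zero-led blocks wholesale, and builds the result back-to-front by prepending each qualifying block's filtered enumerate.
import Mathlib
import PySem

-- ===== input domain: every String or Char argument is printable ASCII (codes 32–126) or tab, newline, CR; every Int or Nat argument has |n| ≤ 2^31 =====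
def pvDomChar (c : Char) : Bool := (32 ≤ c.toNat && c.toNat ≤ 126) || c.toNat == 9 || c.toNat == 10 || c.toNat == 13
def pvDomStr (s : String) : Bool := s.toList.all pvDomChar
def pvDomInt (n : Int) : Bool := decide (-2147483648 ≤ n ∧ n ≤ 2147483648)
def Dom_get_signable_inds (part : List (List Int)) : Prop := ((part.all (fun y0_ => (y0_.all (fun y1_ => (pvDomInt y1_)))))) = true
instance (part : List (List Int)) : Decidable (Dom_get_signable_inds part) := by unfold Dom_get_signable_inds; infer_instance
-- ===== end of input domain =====

-- B recurses over the block list, computes each block's flat start offset arithmetically, skips empty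
-- and zero-led blocks wholesale, and builds the result back-to-front (alternative decomposition, same cost).

-- ===== PORT A =====
def get_signable_inds (part : List (List Int)) : List Int :=
  ((PySem.List.pyRange 0 part.length 1).foldl (fun (st : List Int × Int) i =>
    let row := PySem.List.pyGetD part i []
    (PySem.List.pyRange 0 row.length 1).foldl (fun (st : List Int × Int) j =>
      let st' :=
        if PySem.List.pyGetD row 0 0 ≠ 0 ∧ PySem.List.pyGetD row j 0 ≠ PySem.List.pyGetD row 0 0
        then (st.1 ++ [st.2], st.2) else st
      (st'.1, st'.2 + 1)) st) (([] : List Int), (0 : Int))).1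

-- ===== PORT B =====
-- helper `go(rows, offset)` of Source B
def pvGoAlt : List (List Int) → Int → List Int
  | [], _ => []
  | row :: rows, offset =>
    let rest := pvGoAlt rows (offset + row.length)
    if row ≠ [] ∧ PySem.List.pyGetD row 0 0 ≠ 0 then
      (PySem.List.enumerate row offset).filterMap
        (fun p => if p.2 ≠ PySem.List.pyGetD row 0 0 then some p.1 else none) ++ rest
    else rest

def get_signable_inds_alt (part : List (List Int)) : List Int := pvGoAlt part 0

-- ===== PRECONDITION & SPEC =====
def Spec_get_signable_inds (part : List (List Int)) (out : List Int) : Prop := out = get_signable_inds_alt part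
instance (part : List (List Int)) (out : List Int) : Decidable (Spec_get_signable_inds part out) := by unfold Spec_get_signable_inds; infer_instance

-- ===== CLAIM (what is proved, stated in full; the proofs are below) =====
def Claim_equal_get_signable_inds : Prop := ∀ (part : List (List Int)), Dom_get_signable_inds part → Spec_get_signable_inds part (get_signable_inds part)

-- ===== LEMMAS AND PROOFS =====

-- inner loop of A over one row, with the block head abstracted as `first`
theorem pv_inner (first : Int) (row : List Int) (acc : List Int) (ind : Int) :
    row.foldl (fun (st : List Int × Int) v =>
      let st' := if first ≠ 0 ∧ v ≠ first then (st.1 ++ [st.2], st.2) else st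
      (st'.1, st'.2 + 1)) (acc, ind)
    = (acc ++ (PySem.List.enumerate row ind).filterMap
        (fun p => if first ≠ 0 ∧ p.2 ≠ first then some p.1 else none),
       ind + row.length) := by
  induction row generalizing acc ind with
  | nil => simp
  | cons v t ih =>
    simp only [List.foldl_cons, PySem.List.enumerate_cons, List.filterMap_cons]
    by_cases h : first ≠ 0 ∧ v ≠ first
    · simp only [if_pos h, ih]
      exact Prod.ext (by simp) (by simp; omega)
    · simp only [if_neg h, ih]
      exact Prod.ext (by simp) (by simp; omega)

-- outer loop of A = B's recursion pvGoAlt, appended to the accumulator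
theorem pv_outer (part : List (List Int)) (acc : List Int) (ind : Int) :
    part.foldl (fun (st : List Int × Int) row =>
      row.foldl (fun (st : List Int × Int) v =>
        let st' := if PySem.List.pyGetD row 0 0 ≠ 0 ∧ v ≠ PySem.List.pyGetD row 0 0
                   then (st.1 ++ [st.2], st.2) else st
        (st'.1, st'.2 + 1)) st) (acc, ind)
    = (acc ++ pvGoAlt part ind, ind + (part.map List.length).sum) := by
  induction part generalizing acc ind with
  | nil => simp [pvGoAlt]
  | cons row t ih =>
    simp only [List.foldl_cons]
    rw [pv_inner (PySem.List.pyGetD row 0 0) row acc ind, ih]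
    refine Prod.ext ?_ (by simp; omega)
    simp only [pvGoAlt]
    by_cases h : row ≠ [] ∧ PySem.List.pyGetD row 0 0 ≠ 0
    · rw [if_pos h]
      have : (fun (p : Int × Int) => if PySem.List.pyGetD row 0 0 ≠ 0 ∧ p.2 ≠ PySem.List.pyGetD row 0 0 then some p.1 else none)
           = (fun (p : Int × Int) => if p.2 ≠ PySem.List.pyGetD row 0 0 then some p.1 else none) := by
        funext p; simp [h.2]
      simp [this]
    · rw [if_neg h]
      rcases not_and_or.mp h with h1 | h2
      · have : row = [] := not_not.mp h1
        simp [this]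
      · have h0 : PySem.List.pyGetD row 0 0 = 0 := not_not.mp h2
        have : (fun (p : Int × Int) => if PySem.List.pyGetD row 0 0 ≠ 0 ∧ p.2 ≠ PySem.List.pyGetD row 0 0 then some p.1 else none)
             = (fun (_ : Int × Int) => (none : Option Int)) := by
          funext p; simp [h0]
        simp [this]

-- ===== VERDICT (by name: the statement is the Claim_ definition above) =====
theorem get_signable_inds_spec : Claim_equal_get_signable_inds := by
  intro part _
  show get_signable_inds part = get_signable_inds_alt part
  unfold get_signable_inds get_signable_inds_alt
  rw [PySem.List.foldl_pyRange_zero_pyGetD' part ([] : List Int)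
      (fun (st : List Int × Int) row =>
        (PySem.List.pyRange 0 row.length 1).foldl (fun (st : List Int × Int) j =>
          let st' :=
            if PySem.List.pyGetD row 0 0 ≠ 0 ∧ PySem.List.pyGetD row j 0 ≠ PySem.List.pyGetD row 0 0
            then (st.1 ++ [st.2], st.2) else st
          (st'.1, st'.2 + 1)) st) (([] : List Int), (0 : Int))]
  have hrow : ∀ (row : List Int) (st : List Int × Int),
      (PySem.List.pyRange 0 row.length 1).foldl (fun (st : List Int × Int) j =>
          let st' :=
            if PySem.List.pyGetD row 0 0 ≠ 0 ∧ PySem.List.pyGetD row j 0 ≠ PySem.List.pyGetD row 0 0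
            then (st.1 ++ [st.2], st.2) else st
          (st'.1, st'.2 + 1)) st
      = row.foldl (fun (st : List Int × Int) v =>
          let st' := if PySem.List.pyGetD row 0 0 ≠ 0 ∧ v ≠ PySem.List.pyGetD row 0 0
                     then (st.1 ++ [st.2], st.2) else st
          (st'.1, st'.2 + 1)) st := by
    intro row st
    exact PySem.List.foldl_pyRange_zero_pyGetD' row (0 : Int)
        (fun (st : List Int × Int) v =>
          let st' := if PySem.List.pyGetD row 0 0 ≠ 0 ∧ v ≠ PySem.List.pyGetD row 0 0
                     then (st.1 ++ [st.2], st.2) else st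
          (st'.1, st'.2 + 1)) st
  simp only [hrow]
  rw [pv_outer]
  simp
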